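-- pv_equiv track=rewrite | github.com/AdityaManojMenon/Mobile_text_editor | phone_text_editor.py | fill_completions
-- ===== SOURCE A (Python) =====
-- def fill_completions(words):
--     # The fill_completions function returns a dictionary of dictionaries of words which are arranged by the placement of a given letter at a specified index.
--     dict_word={}
--     set_keys=set()
--     for element in words:
--         element=element.lower()
--         for i, ch in enumerate(element):
--             if (i,ch) not in dict_word:
--                 dict_word[(i,ch)] = set() # checks if the index and character in the dictionary and if not returns empty set
--     for key in dict_word:
--         for element in words:
--             element=element.lower()
--             for i, ch in enumerate(element):
--                 if key[0] == i and key[1] == ch:# checks if the indexing of the words form the argument matches the index and character of the key.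
--                     dict_word[key].add(element)
--     return dict_word
-- ===== SOURCE B (Python) =====
-- def fill_completions(words):
--     # Single pass: each lowered word is added directly to the bucket of every
--     # (index, char) pair it contains; buckets are created on first sight.
--     dict_word = {}
--     for element in words:
--         element = element.lower()
--         for i, ch in enumerate(element):
--             dict_word.setdefault((i, ch), set()).add(element)
--     return dict_word
-- ===== Notes on version B (the rewrite author's own statement) =====
-- stated objective: faster
-- what changed: replaces A's two-phase scheme (collect all (index,char) keys, then for each key rescan every word at every position) with a single pass that adds each lowered word directly to its (index,char) buckets created on first sight
import Mathlib
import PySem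

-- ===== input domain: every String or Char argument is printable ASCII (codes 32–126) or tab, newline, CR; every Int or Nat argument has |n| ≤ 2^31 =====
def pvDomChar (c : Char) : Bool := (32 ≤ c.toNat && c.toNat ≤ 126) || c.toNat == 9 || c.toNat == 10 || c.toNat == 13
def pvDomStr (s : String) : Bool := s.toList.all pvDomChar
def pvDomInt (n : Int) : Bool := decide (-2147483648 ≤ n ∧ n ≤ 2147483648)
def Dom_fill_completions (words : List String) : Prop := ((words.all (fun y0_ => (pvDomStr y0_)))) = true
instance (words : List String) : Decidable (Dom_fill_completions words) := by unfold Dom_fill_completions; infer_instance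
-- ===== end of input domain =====

-- B replaces A's two-phase quadratic scheme (collect all keys, then rescan every word at every
-- position for every key) by a single pass adding each lowered word to its (index,char) buckets.

-- ===== PORT A =====
-- dict keys (i, ch) are ported as Int × String (ch a one-character string, as in Python); the
-- returned dict[(i,ch)] = set(...) becomes the association list of (i, ch, set-as-list).
def fill_completions (words : List String) : List (Int × String × List String) :=
  -- first loop: dict_word[(i,ch)] = set() for each unseen (i, ch)
  let d1 : PySem.Dict (Int × String) (PySem.Set String) :=
    words.foldl (fun d w =>
      (PySem.List.enumerate (PySem.Str.lower w).toList).foldl (fun d p =>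
        if d.contains (p.1, String.ofList [p.2]) then d
        else d.insert (p.1, String.ofList [p.2]) PySem.Set.empty) d) PySem.Dict.empty
  -- second loop: for key in dict_word: for element in words: for i, ch: if key matches: add
  let d2 : PySem.Dict (Int × String) (PySem.Set String) :=
    d1.keys.foldl (fun d key =>
      words.foldl (fun d w =>
        (PySem.List.enumerate (PySem.Str.lower w).toList).foldl (fun d p =>
          if key.1 = p.1 ∧ key.2 = String.ofList [p.2] then
            d.modify key PySem.Set.empty (fun s => PySem.Set.add s (PySem.Str.lower w))
          else d) d) d) d1
  d2.items.map (fun q => (q.1.1, q.1.2, q.2))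

-- ===== PORT B =====
-- dict_word.setdefault((i, ch), set()).add(element)  ==  d[(i,ch)] = d.get((i,ch), set()) ∪ {element},
-- i.e. Dict.modify (i,ch) ∅ (·.add element)
def fill_completions_alt (words : List String) : List (Int × String × List String) :=
  let d : PySem.Dict (Int × String) (PySem.Set String) :=
    words.foldl (fun d w =>
      (PySem.List.enumerate (PySem.Str.lower w).toList).foldl (fun d p =>
        d.modify (p.1, String.ofList [p.2]) PySem.Set.empty
          (fun s => PySem.Set.add s (PySem.Str.lower w))) d)
      PySem.Dict.empty
  d.items.map (fun q => (q.1.1, q.1.2, q.2))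

-- ===== PRECONDITION & SPEC =====
def Spec_fill_completions (words : List String) (out : List (Int × String × List String)) : Prop := out = fill_completions_alt words
instance (words : List String) (out : List (Int × String × List String)) : Decidable (Spec_fill_completions words out) := by unfold Spec_fill_completions; infer_instance

-- ===== CLAIM (what is proved, stated in full; the proofs are below) =====
def Claim_equal_fill_completions : Prop := ∀ (words : List String), Dom_fill_completions words → Spec_fill_completions words (fill_completions words)

-- ===== LEMMAS AND PROOFS =====

-- the (index, one-char-string) keys contributed by one word
def pvKeysOf (w : String) : List (Int × String) :=
  (PySem.List.enumerate (PySem.Str.lower w).toList).map (fun p => (p.1, String.ofList [p.2]))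

-- the lowered words matching key k, in word order (each word matches at most its own position k.1)
def pvMatchSeq (words : List String) (k : Int × String) : List String :=
  words.flatMap (fun w =>
    ((PySem.List.enumerate (PySem.Str.lower w).toList).filter
      (fun p => (p.1, String.ofList [p.2]) == k)).map (fun _ => PySem.Str.lower w))

-- B's stream of (key, lowered word) insertions
def pvStream (words : List String) : List ((Int × String) × String) :=
  words.flatMap (fun w => (PySem.List.enumerate (PySem.Str.lower w).toList).map
    (fun p => ((p.1, String.ofList [p.2]), PySem.Str.lower w)))

-- A's phase-1 step and phase-2 step, B's step
def pvA1 (d : PySem.Dict (Int × String) (PySem.Set String)) (k : Int × String) :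
    PySem.Dict (Int × String) (PySem.Set String) :=
  if d.contains k then d else d.insert k PySem.Set.empty

def pvA2 (words : List String) (d : PySem.Dict (Int × String) (PySem.Set String))
    (key : Int × String) : PySem.Dict (Int × String) (PySem.Set String) :=
  words.foldl (fun d w =>
    (PySem.List.enumerate (PySem.Str.lower w).toList).foldl (fun d p =>
      if key.1 = p.1 ∧ key.2 = String.ofList [p.2] then
        d.modify key PySem.Set.empty (fun s => PySem.Set.add s (PySem.Str.lower w))
      else d) d) d

def pvB (d : PySem.Dict (Int × String) (PySem.Set String)) (q : (Int × String) × String) :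
    PySem.Dict (Int × String) (PySem.Set String) :=
  d.modify q.1 PySem.Set.empty (fun s => PySem.Set.add s q.2)

theorem pv_update_cons {α : Type} [BEq α] (s : PySem.Set α) (a : α) (t : List α) :
    PySem.Set.update s (a :: t) = PySem.Set.update (PySem.Set.add s a) t := rfl

theorem pv_beq_decide (p : Int × Char) (k : Int × String) :
    ((p.1, String.ofList [p.2]) == k) = decide (k.1 = p.1 ∧ k.2 = String.ofList [p.2]) := by
  rw [Bool.eq_iff_iff]
  simp only [beq_iff_eq, decide_eq_true_eq, Prod.ext_iff]
  exact ⟨fun ⟨h1, h2⟩ => ⟨h1.symm, h2.symm⟩, fun ⟨h1, h2⟩ => ⟨h1.symm, h2.symm⟩⟩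

theorem pv_portA_eq (words : List String) :
    fill_completions words =
      ((((words.flatMap pvKeysOf).foldl pvA1 PySem.Dict.empty).keys.foldl (pvA2 words)
          ((words.flatMap pvKeysOf).foldl pvA1 PySem.Dict.empty)).items.map
        (fun q => (q.1.1, q.1.2, q.2))) := by
  have h1 : words.foldl (fun d w =>
      (PySem.List.enumerate (PySem.Str.lower w).toList).foldl (fun d p =>
        if d.contains (p.1, String.ofList [p.2]) then d
        else d.insert (p.1, String.ofList [p.2]) PySem.Set.empty) d) PySem.Dict.empty
      = (words.flatMap pvKeysOf).foldl pvA1 PySem.Dict.empty := by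
    rw [List.foldl_flatMap]
    refine PySem.List.foldl_congr_mem _ _ _ _ (fun d w _ => ?_)
    simp only [pvKeysOf, List.foldl_map, pvA1]
  simp only [fill_completions]
  rw [h1]
  rfl

theorem pv_portB_eq (words : List String) :
    fill_completions_alt words =
      (((pvStream words).foldl pvB PySem.Dict.empty).items.map (fun q => (q.1.1, q.1.2, q.2))) := by
  have h1 : words.foldl (fun d w =>
      (PySem.List.enumerate (PySem.Str.lower w).toList).foldl (fun d p =>
        d.modify (p.1, String.ofList [p.2]) PySem.Set.empty
          (fun s => PySem.Set.add s (PySem.Str.lower w))) d) PySem.Dict.empty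
      = (pvStream words).foldl pvB PySem.Dict.empty := by
    simp only [pvStream]
    rw [List.foldl_flatMap]
    refine PySem.List.foldl_congr_mem _ _ _ _ (fun d w _ => ?_)
    simp only [List.foldl_map, pvB]
  simp only [fill_completions_alt]
  rw [h1]

theorem pv_keys_a1_fold (l : List (Int × String)) (d : PySem.Dict (Int × String) (PySem.Set String)) :
    (l.foldl pvA1 d).keys = PySem.Set.update d.keys l := by
  induction l generalizing d with
  | nil => rfl
  | cons k l ih =>
    rw [List.foldl_cons, ih, pv_update_cons]
    congr 1
    unfold pvA1
    split
    · rename_i h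
      have hm : k ∈ d.keys := (PySem.Dict.contains_iff_mem_keys d k).mp h
      simp [PySem.Set.add, hm]
    · rename_i h
      rw [PySem.Dict.keys_insert_of_not_contains d _ (by simpa using h)]
      have hm : k ∉ d.keys := fun hmem =>
        h ((PySem.Dict.contains_iff_mem_keys d k).mpr hmem)
      simp [PySem.Set.add, hm]

theorem pv_getD_a1_fold (l : List (Int × String)) (d : PySem.Dict (Int × String) (PySem.Set String))
    (h : ∀ j, d.getD j PySem.Set.empty = PySem.Set.empty) (j : Int × String) :
    (l.foldl pvA1 d).getD j PySem.Set.empty = PySem.Set.empty := by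
  induction l generalizing d with
  | nil => exact h j
  | cons k l ih =>
    refine ih _ (fun j => ?_)
    unfold pvA1
    split
    · exact h j
    · rw [PySem.Dict.getD_insert]
      split
      · rfl
      · exact h j

theorem pv_getD_b_fold (L : List ((Int × String) × String))
    (d : PySem.Dict (Int × String) (PySem.Set String)) (j : Int × String) :
    (L.foldl pvB d).getD j PySem.Set.empty
      = PySem.Set.update (d.getD j PySem.Set.empty)
          ((L.filter (fun q => q.1 == j)).map (·.2)) := by
  induction L generalizing d with
  | nil => rfl
  | cons q L ih =>
    rw [List.foldl_cons, ih]
    by_cases hq : q.1 = j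
    · subst hq
      simp [pvB, PySem.Dict.getD_modify_self]
    · have hb : (q.1 == j) = false := by simpa using hq
      simp [pvB, PySem.Dict.getD_modify, hb, Ne.symm hq]

theorem pv_getD_c_fold (ws : List String) (k : Int × String)
    (d : PySem.Dict (Int × String) (PySem.Set String)) (j : Int × String) :
    ((ws.foldl (fun d w => d.modify k PySem.Set.empty (fun s => PySem.Set.add s w)) d).getD j
        PySem.Set.empty)
      = if j = k then PySem.Set.update (d.getD k PySem.Set.empty) ws
        else d.getD j PySem.Set.empty := by
  induction ws generalizing d with
  | nil =>
    split
    · rename_i h; rw [h]; rfl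
    · rfl
  | cons w ws ih =>
    rw [List.foldl_cons, ih]
    by_cases hj : j = k
    · subst hj
      simp [PySem.Dict.getD_modify_self]
    · simp [hj, PySem.Dict.getD_modify]

theorem pv_a2_eq (words : List String) (d : PySem.Dict (Int × String) (PySem.Set String))
    (k : Int × String) :
    pvA2 words d k
      = (pvMatchSeq words k).foldl
          (fun d w => d.modify k PySem.Set.empty (fun s => PySem.Set.add s w)) d := by
  unfold pvA2 pvMatchSeq
  rw [List.foldl_flatMap]
  refine PySem.List.foldl_congr_mem _ _ _ _ (fun d w _ => ?_)
  rw [List.foldl_map, PySem.List.foldl_ite_eq_foldl_filter,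
    List.filter_congr (fun p (_ : p ∈ PySem.List.enumerate (PySem.Str.lower w).toList) =>
      (pv_beq_decide p k).symm)]

theorem pv_keys_c_fold (ws : List String) (k : Int × String)
    (d : PySem.Dict (Int × String) (PySem.Set String)) (h : k ∈ d.keys) :
    (ws.foldl (fun d w => d.modify k PySem.Set.empty (fun s => PySem.Set.add s w)) d).keys
      = d.keys := by
  induction ws generalizing d with
  | nil => rfl
  | cons w ws ih =>
    rw [List.foldl_cons]
    have hk : (d.modify k PySem.Set.empty
        (fun s => PySem.Set.add s w)).keys = d.keys := by
      rw [PySem.Dict.keys_modify,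
        PySem.Dict.keys_insert_of_contains _ _ ((PySem.Dict.contains_iff_mem_keys d k).mpr h)]
    rw [ih _ (by rw [hk]; exact h), hk]

theorem pv_keys_a2_fold (words : List String) (ks : List (Int × String))
    (d : PySem.Dict (Int × String) (PySem.Set String)) (h : ∀ k ∈ ks, k ∈ d.keys) :
    (ks.foldl (pvA2 words) d).keys = d.keys := by
  induction ks generalizing d with
  | nil => rfl
  | cons k ks ih =>
    rw [List.foldl_cons]
    have hk : (pvA2 words d k).keys = d.keys := by
      rw [pv_a2_eq]
      exact pv_keys_c_fold _ _ _ (h k (by simp))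
    rw [ih _ (fun k' hk' => by rw [hk]; exact h k' (by simp [hk'])), hk]

theorem pv_getD_a2_fold (words : List String) (ks : List (Int × String)) (hnd : ks.Nodup)
    (d : PySem.Dict (Int × String) (PySem.Set String)) (j : Int × String) :
    (ks.foldl (pvA2 words) d).getD j PySem.Set.empty
      = if j ∈ ks then PySem.Set.update (d.getD j PySem.Set.empty) (pvMatchSeq words j)
        else d.getD j PySem.Set.empty := by
  induction ks generalizing d with
  | nil => simp
  | cons k ks ih =>
    rw [List.foldl_cons, ih (hnd.of_cons)]
    have hgd : ∀ j', (pvA2 words d k).getD j' PySem.Set.empty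
        = if j' = k then PySem.Set.update (d.getD k PySem.Set.empty) (pvMatchSeq words k)
          else d.getD j' PySem.Set.empty := by
      intro j'; rw [pv_a2_eq]; exact pv_getD_c_fold _ _ _ _
    by_cases hj : j = k
    · subst hj
      have hns : j ∉ ks := (List.nodup_cons.mp hnd).1
      rw [if_neg hns, if_pos (List.mem_cons_self), hgd j, if_pos rfl]
    · rw [hgd j, if_neg hj]
      by_cases hmem : j ∈ ks <;> simp [hmem, hj]

theorem pv_stream_fst (words : List String) :
    (pvStream words).map (·.1) = words.flatMap pvKeysOf := by
  rw [pvStream, List.map_flatMap]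
  refine congrArg (fun f => List.flatMap f words) (funext fun w => ?_)
  rw [List.map_map]
  rfl

theorem pv_stream_match (words : List String) (j : Int × String) :
    ((pvStream words).filter (fun q => q.1 == j)).map (·.2) = pvMatchSeq words j := by
  rw [pvStream, pvMatchSeq, List.filter_flatMap, List.map_flatMap]
  refine congrArg (fun f => List.flatMap f words) (funext fun w => ?_)
  rw [List.filter_map, List.map_map]
  rfl

-- ===== VERDICT (by name: the statement is the Claim_ definition above) =====
theorem fill_completions_spec : Claim_equal_fill_completions := by
  intro words _
  unfold Spec_fill_completions
  rw [pv_portA_eq, pv_portB_eq]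
  have hk1 : ((words.flatMap pvKeysOf).foldl pvA1 PySem.Dict.empty).keys
      = PySem.Set.ofList (words.flatMap pvKeysOf) := by
    rw [pv_keys_a1_fold, PySem.Set.ofList_eq_foldl]
    rfl
  have hnd1 : ((words.flatMap pvKeysOf).foldl pvA1 PySem.Dict.empty).keys.Nodup := by
    rw [hk1]; exact PySem.Set.nodup_ofList _
  have hgd1 : ∀ j, ((words.flatMap pvKeysOf).foldl pvA1 PySem.Dict.empty).getD j PySem.Set.empty
      = PySem.Set.empty :=
    pv_getD_a1_fold _ _ (fun j => PySem.Dict.getD_empty j PySem.Set.empty)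
  have hkB : ((pvStream words).foldl pvB PySem.Dict.empty).keys
      = PySem.Set.ofList (words.flatMap pvKeysOf) := by
    have : (pvStream words).foldl pvB PySem.Dict.empty
        = (pvStream words).foldl
            (fun d x => d.modify x.1 PySem.Set.empty
              ((fun (_ : PySem.Dict (Int × String) (PySem.Set String))
                  (q : (Int × String) × String) (s : PySem.Set String) =>
                PySem.Set.add s q.2) d x)) PySem.Dict.empty := rfl
    rw [this, PySem.Dict.keys_foldl_modify_key, pv_stream_fst, PySem.Set.ofList_eq_foldl]
    rfl
  have hndB : ((pvStream words).foldl pvB PySem.Dict.empty).keys.Nodup := by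
    rw [hkB]; exact PySem.Set.nodup_ofList _
  have hgdB : ∀ j, ((pvStream words).foldl pvB PySem.Dict.empty).getD j PySem.Set.empty
      = PySem.Set.update PySem.Set.empty (pvMatchSeq words j) := by
    intro j
    rw [pv_getD_b_fold, PySem.Dict.getD_empty, pv_stream_match]
  have hk2 : (((words.flatMap pvKeysOf).foldl pvA1 PySem.Dict.empty).keys.foldl (pvA2 words)
      ((words.flatMap pvKeysOf).foldl pvA1 PySem.Dict.empty)).keys
      = ((words.flatMap pvKeysOf).foldl pvA1 PySem.Dict.empty).keys :=
    pv_keys_a2_fold _ _ _ (fun _ hk => hk)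
  have hnd2 : (((words.flatMap pvKeysOf).foldl pvA1 PySem.Dict.empty).keys.foldl (pvA2 words)
      ((words.flatMap pvKeysOf).foldl pvA1 PySem.Dict.empty)).keys.Nodup := by
    rw [hk2]; exact hnd1
  rw [PySem.Dict.items_eq_map_keys _ hnd2 PySem.Set.empty,
    PySem.Dict.items_eq_map_keys _ hndB PySem.Set.empty, List.map_map, List.map_map,
    hk2, show ((pvStream words).foldl pvB PySem.Dict.empty).keys
      = ((words.flatMap pvKeysOf).foldl pvA1 PySem.Dict.empty).keys from hkB.trans hk1.symm]
  refine List.map_congr_left (fun k hkmem => ?_)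
  have h2 := pv_getD_a2_fold words _ hnd1 ((words.flatMap pvKeysOf).foldl pvA1 PySem.Dict.empty) k
  rw [if_pos hkmem, hgd1 k] at h2
  simp only [Function.comp_apply]
  rw [h2, hgdB k]
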